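-- pv_equiv track=rewrite | github.com/dianaabdirahmanova711-tech/homeworks | lab1/1.task.py | group_by_parity_and_sort
-- ===== SOURCE A (Python) =====
-- def group_by_parity_and_sort(nums):
--     evens = []
--     odds = []
--
--     for num in nums:
--         if num % 2 == 0:
--             evens.append(num)
--         else:
--             odds.append(num)
--
--     evens.sort()
--     odds.sort()
--
--     return evens + odds
-- ===== SOURCE B (Python) =====
-- def group_by_parity_and_sort(nums):
--     s = sorted(nums)
--     return [x for x in s if x % 2 == 0] + [x for x in s if x % 2 != 0]
-- ===== Notes on version B (the rewrite author's own statement) =====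
-- stated objective: simpler
-- what changed: B sorts the whole list once and then filters the sorted sequence by parity twice (sort-then-partition via comprehensions), instead of A's loop partitioning into two lists that are each sorted.
import Mathlib
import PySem

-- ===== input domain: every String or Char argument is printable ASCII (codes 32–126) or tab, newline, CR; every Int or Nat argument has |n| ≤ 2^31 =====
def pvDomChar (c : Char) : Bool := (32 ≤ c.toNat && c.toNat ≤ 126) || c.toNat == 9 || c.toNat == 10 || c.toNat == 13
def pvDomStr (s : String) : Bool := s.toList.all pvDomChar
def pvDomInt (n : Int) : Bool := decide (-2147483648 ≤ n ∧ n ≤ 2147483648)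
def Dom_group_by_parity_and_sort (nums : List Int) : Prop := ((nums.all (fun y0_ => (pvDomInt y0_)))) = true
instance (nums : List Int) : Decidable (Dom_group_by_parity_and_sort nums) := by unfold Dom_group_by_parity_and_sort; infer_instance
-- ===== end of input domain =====

-- B sorts once then filters the sorted list by parity twice (sort-then-partition) instead of A's partition-then-sort-each; simpler decomposition, same cost.


-- ===== PORT A =====
-- single loop appending each element to evens or odds, then sort each group, concatenate
def group_by_parity_and_sort (nums : List Int) : List Int :=
  let eo := nums.foldl
    (fun (acc : List Int × List Int) num =>
      if PySem.Int.mod num 2 = 0 then (acc.1 ++ [num], acc.2) else (acc.1, acc.2 ++ [num]))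
    ([], [])
  PySem.List.sorted eo.1 (fun x => x) false ++ PySem.List.sorted eo.2 (fun x => x) false

-- ===== PORT B =====
-- sort the whole list once, then filter the sorted sequence twice and concatenate
def group_by_parity_and_sort_alt (nums : List Int) : List Int :=
  let s := PySem.List.sorted nums (fun x => x) false
  s.filter (fun x => PySem.Int.mod x 2 == 0) ++ s.filter (fun x => !(PySem.Int.mod x 2 == 0))

-- ===== PRECONDITION & SPEC =====
def Spec_group_by_parity_and_sort (nums : List Int) (out : List Int) : Prop := out = group_by_parity_and_sort_alt nums
instance (nums : List Int) (out : List Int) : Decidable (Spec_group_by_parity_and_sort nums out) := by unfold Spec_group_by_parity_and_sort; infer_instance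

-- ===== CLAIM (what is proved, stated in full; the proofs are below) =====
def Claim_equal_group_by_parity_and_sort : Prop := ∀ (nums : List Int), Dom_group_by_parity_and_sort nums → Spec_group_by_parity_and_sort nums (group_by_parity_and_sort nums)

-- ===== LEMMAS AND PROOFS =====

-- A's loop computes the two parity filters (state characterisation of the pair fold)
theorem pvLoop_eq_filters (nums e o : List Int) :
    nums.foldl
      (fun (acc : List Int × List Int) num =>
        if PySem.Int.mod num 2 = 0 then (acc.1 ++ [num], acc.2) else (acc.1, acc.2 ++ [num]))
      (e, o)
    = (e ++ nums.filter (fun x => PySem.Int.mod x 2 == 0),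
       o ++ nums.filter (fun x => !(PySem.Int.mod x 2 == 0))) := by
  induction nums generalizing e o with
  | nil => simp
  | cons x xs ih =>
    rw [List.foldl_cons]
    by_cases h : PySem.Int.mod x 2 = 0
    · have hp : (PySem.Int.mod x 2 == 0) = true := beq_iff_eq.mpr h
      rw [if_pos h, ih]
      simp [List.filter_cons, hp]
      exact (PySem.Int.mod_eq_zero_iff_dvd x 2).mp h
    · have hp : (PySem.Int.mod x 2 == 0) = false := beq_eq_false_iff_ne.mpr h
      rw [if_neg h, ih]
      simp [List.filter_cons, hp]
      rw [PySem.Int.mod_eq_zero_iff_dvd] at h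
      omega

-- sorting a filter equals filtering the sort (stability with the identity key)
theorem pvSorted_filter (nums : List Int) (p : Int → Bool) :
    PySem.List.sorted (nums.filter p) (fun x => x) false
      = (PySem.List.sorted nums (fun x => x) false).filter p := by
  apply PySem.List.eq_of_perm_of_pairwise_le_of_injective (fun x : Int => x)
    (fun a b h => h)
  · exact (PySem.List.sorted_perm _ _ _).trans
      ((PySem.List.sorted_perm nums (fun x => x) false).filter p).symm
  · exact PySem.List.sorted_pairwise _ _
  · exact (PySem.List.sorted_pairwise nums (fun x => x)).filter _

-- ===== VERDICT (by name: the statement is the Claim_ definition above) =====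
theorem group_by_parity_and_sort_spec : Claim_equal_group_by_parity_and_sort := by
  intro nums _
  unfold Spec_group_by_parity_and_sort group_by_parity_and_sort group_by_parity_and_sort_alt
  simp only [pvLoop_eq_filters nums [] [], List.nil_append]
  rw [pvSorted_filter, pvSorted_filter]
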